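-- pv_equiv track=rewrite | github.com/bfoon/easyoffice | easyoffice/apps/projects/geo_utils.py | _olc_is_full
-- ===== SOURCE A (Python) =====
-- _OLC_ALPHABET = '23456789CFGHJMPQRVWX'
--
-- def _olc_is_full(code: str) -> bool:
--     code = code.strip().upper()
--     plus = code.find('+')
--     if plus < 0:
--         return False
--     if plus != 8 and (plus < 8 and len(code) < plus + 3):
--         pass
--     if any(c not in _OLC_ALPHABET and c != '+' and c != '0' for c in code.replace('0', '')):
--         return False
--     return '+' in code and code.index('+') >= 2
-- ===== SOURCE B (Python) =====
-- _OLC_ALPHABET = '23456789CFGHJMPQRVWX'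
--
--
-- def _olc_is_full(code: str) -> bool:
--     # Single-pass finite-state machine: states 0/1/2 count (saturating) the
--     # allowed characters seen before the first '+', 3 = accepting (first '+'
--     # arrived at position >= 2), 4 = dead state.
--     allowed = set(_OLC_ALPHABET + '0')
--     state = 0
--     for ch in code.strip().upper():
--         if state < 3:
--             if ch == '+':
--                 state = 3 if state >= 2 else 4
--             elif ch in allowed:
--                 state = min(state + 1, 2)
--             else:
--                 state = 4
--         elif state == 3:
--             if ch not in allowed and ch != '+':
--                 state = 4
--     return state == 3
-- ===== Notes on version B (the rewrite author's own statement) =====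
-- stated objective: alternative
-- what changed: Replaces A's staged find / whole-string any-scan / index chain with one single-pass five-state finite automaton whose saturating counter tracks the prefix length before the first '+' and whose dead state absorbs illegal characters.
import Mathlib
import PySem

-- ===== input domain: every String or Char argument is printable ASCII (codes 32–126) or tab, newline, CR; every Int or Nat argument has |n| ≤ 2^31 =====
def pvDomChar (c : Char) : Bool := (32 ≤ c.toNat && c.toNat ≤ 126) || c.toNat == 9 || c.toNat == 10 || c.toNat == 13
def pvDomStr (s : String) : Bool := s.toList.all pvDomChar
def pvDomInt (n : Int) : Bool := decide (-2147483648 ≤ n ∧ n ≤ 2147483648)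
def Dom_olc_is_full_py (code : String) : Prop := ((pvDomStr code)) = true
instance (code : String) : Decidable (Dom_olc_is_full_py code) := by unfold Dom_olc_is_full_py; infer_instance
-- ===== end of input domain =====

-- B replaces A's find / dead branch / zero-removal-any-scan / index chain by one single-pass
-- five-state finite automaton (saturating prefix counter + dead state); alternative, same O(n).


-- ===== PORT A =====
def OLC_ALPHABET : List Char := "23456789CFGHJMPQRVWX".toList

def olc_is_full_py (code : String) : Bool :=
  let c := PySem.Chars.upper (PySem.Chars.strip code.toList)
  let plus := PySem.Chars.find c ['+']
  if plus < 0 then false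
  -- Python's `if plus != 8 and (plus < 8 and len(code) < plus + 3): pass` has no effect; kept out
  else if (PySem.Chars.replace c ['0'] []).any
      (fun ch => !(OLC_ALPHABET.contains ch) && !(ch == '+') && !(ch == '0')) then false
  -- `code.index('+')` equals `find` here; it is guarded by `'+' in code`, so it never raises
  else PySem.Chars.isIn ['+'] c && decide (2 ≤ PySem.Chars.find c ['+'])

-- ===== PORT B =====
-- Source B's `allowed` set membership (set of the 21 alphabet+'0' characters)
def allowedB (c : Char) : Bool := (OLC_ALPHABET ++ ['0']).contains c

-- one transition of Source B's automaton: 0/1/2 saturating count before the first '+',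
-- 3 accepting, 4 dead
def dfaStep (st : Nat) (ch : Char) : Nat :=
  if st < 3 then
    if ch == '+' then (if 2 ≤ st then 3 else 4)
    else if allowedB ch then min (st + 1) 2
    else 4
  else if st == 3 then
    (if !allowedB ch && !(ch == '+') then 4 else 3)
  else st

def olc_is_full_py_alt (code : String) : Bool :=
  ((PySem.Chars.upper (PySem.Chars.strip code.toList)).foldl dfaStep 0) == 3

-- ===== PRECONDITION & SPEC =====
def Spec_olc_is_full_py (code : String) (out : Bool) : Prop := out = olc_is_full_py_alt code
instance (code : String) (out : Bool) : Decidable (Spec_olc_is_full_py code out) := by unfold Spec_olc_is_full_py; infer_instance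

-- ===== CLAIM (what is proved, stated in full; the proofs are below) =====
def Claim_equal_olc_is_full_py : Prop := ∀ (code : String), Dom_olc_is_full_py code → Spec_olc_is_full_py code (olc_is_full_py code)

-- ===== LEMMAS AND PROOFS =====

-- proof-only intermediate form: split at the first '+', check head length ≥ k and membership
def pyPartitionPlus (l : List Char) : List Char × List Char × List Char :=
  match l.dropWhile (fun ch => ch != '+') with
  | [] => (l, [], [])
  | _ :: t => (l.takeWhile (fun ch => ch != '+'), ['+'], t)

def pvPart (k : Nat) (l : List Char) : Bool :=
  match pyPartitionPlus l with
  | (head, sep, tail) =>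
    sep == ['+'] && decide (k ≤ head.length) &&
      head.all allowedB && tail.all (fun ch => allowedB ch || ch == '+')

-- state 4 is absorbing
theorem fold_dead (l : List Char) : l.foldl dfaStep 4 = 4 := by
  induction l with
  | nil => rfl
  | cons c t ih => simpa [dfaStep] using ih

-- from the accepting state: stay iff every remaining char is allowed or '+'
theorem fold_acc (l : List Char) :
    (l.foldl dfaStep 3 == 3) = l.all (fun ch => allowedB ch || ch == '+') := by
  induction l with
  | nil => rfl
  | cons c t ih =>
    by_cases h : (allowedB c || c == '+') = true
    · have h' : (!allowedB c && !(c == '+')) = false := by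
        cases hA : allowedB c <;> cases hB : c == '+' <;> simp_all
      simp [dfaStep, h', ih, h]
    · have h' : (!allowedB c && !(c == '+')) = true := by
        cases hA : allowedB c <;> cases hB : c == '+' <;> simp_all
      simp [dfaStep, h', fold_dead, h]

theorem fold_eq_part (l : List Char) :
    ∀ s : Nat, s ≤ 2 → (l.foldl dfaStep s == 3) = pvPart (2 - s) l := by
  induction l with
  | nil =>
    intro s hs
    simp [pvPart, pyPartitionPlus]
    omega
  | cons c t ih =>
    intro s hs
    have h3 : s < 3 := by omega
    by_cases hplus : c = '+'
    · subst hplus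
      by_cases h2 : 2 ≤ s
      · have hk : 2 - s = 0 := by omega
        have hstep : dfaStep s '+' = 3 := by simp [dfaStep, h3, h2]
        rw [List.foldl_cons, hstep, fold_acc]
        simp [pvPart, pyPartitionPlus, hk]
      · have hstep : dfaStep s '+' = 4 := by simp [dfaStep, h3, h2]
        rw [List.foldl_cons, hstep, fold_dead]
        simp [pvPart, pyPartitionPlus]
        omega
    · have hne : (c == '+') = false := by simpa using hplus
      have hbne : (c != '+') = true := by simp [bne, hne]
      have hd : (c :: t).dropWhile (fun ch => ch != '+') = t.dropWhile (fun ch => ch != '+') := by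
        simp [hbne]
      have ht : (c :: t).takeWhile (fun ch => ch != '+') = c :: t.takeWhile (fun ch => ch != '+') := by
        simp [hbne]
      by_cases hal : allowedB c = true
      · have hstep : dfaStep s c = min (s + 1) 2 := by
          simp [dfaStep, h3, hne, hal]
        have hrec := ih (min (s + 1) 2) (by omega)
        rw [List.foldl_cons, hstep, hrec]
        unfold pvPart pyPartitionPlus
        rw [hd]
        cases hcase : t.dropWhile (fun ch => ch != '+') with
        | nil => simp
        | cons x xs =>
          simp only [ht]
          have hlen : (decide (2 - min (s + 1) 2 ≤ (t.takeWhile (fun ch => ch != '+')).length))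
              = (decide (2 - s ≤ (t.takeWhile (fun ch => ch != '+')).length + 1)) := by
            by_cases h : 2 - s ≤ (t.takeWhile (fun ch => ch != '+')).length + 1 <;>
              [skip; skip] <;> simp [h] <;> omega
          simp only [List.length_cons, List.all_cons, hal, hlen, Bool.true_and]
          rfl
      · have hal' : allowedB c = false := by simpa using hal
        have hstep : dfaStep s c = 4 := by
          simp [dfaStep, h3, hne, hal']
        rw [List.foldl_cons, hstep, fold_dead]
        unfold pvPart pyPartitionPlus
        rw [hd]
        cases hcase : t.dropWhile (fun ch => ch != '+') with
        | nil => simp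
        | cons x xs => simp [ht, hal']

-- [a] is a prefix of xs iff xs starts with a
theorem singleton_prefix_iff {a : Char} {xs : List Char} :
    [a] <+: xs ↔ ∃ t, xs = a :: t := by
  constructor
  · rintro ⟨t, rfl⟩; exact ⟨t, rfl⟩
  · rintro ⟨t, rfl⟩; exact ⟨t, rfl⟩

-- replace(s, '0', '') removes exactly the '0' characters
theorem replace_zero_go (l acc : List Char) :
    PySem.Chars.replace.go ['0'] [] l.length l acc
      = acc.reverse ++ l.filter (fun c => c != '0') := by
  induction l generalizing acc with
  | nil => simp [PySem.Chars.replace.go]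
  | cons c t ih =>
    by_cases hc : c = '0'
    · subst hc
      simpa [PySem.Chars.replace.go, List.isPrefixOf, List.filter] using ih acc
    · have hpr : (['0'].isPrefixOf (c :: t)) = false := by
        simp [List.isPrefixOf]; exact fun h => hc h.symm
      simp [PySem.Chars.replace.go, hpr, ih (c :: acc), hc]

theorem replace_zero (l : List Char) :
    PySem.Chars.replace l ['0'] [] = l.filter (fun c => c != '0') := by
  simpa [PySem.Chars.replace] using replace_zero_go l []

theorem any_congr_mem {α : Type} {l : List α} {p q : α → Bool}
    (h : ∀ a ∈ l, p a = q a) : l.any p = l.any q := by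
  induction l with
  | nil => rfl
  | cons a t ih =>
    simp [List.any_cons, h a (by simp), ih (fun b hb => h b (by simp [hb]))]

theorem head_pt (a : Char) (hne : (a == '+') = false) :
    (a != '0' && (!decide (a ∈ OLC_ALPHABET) && !(a == '+') && !(a == '0')))
      = !(allowedB a) := by
  by_cases hA : a ∈ OLC_ALPHABET <;> by_cases hB : a = '0' <;>
    simp_all [allowedB, Bool.beq_eq_decide_eq, bne]

theorem tail_pt (a : Char) :
    (a != '0' && (!decide (a ∈ OLC_ALPHABET) && !(a == '+') && !(a == '0')))
      = !(allowedB a || a == '+') := by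
  by_cases hA : a ∈ OLC_ALPHABET <;> by_cases hB : a = '0' <;> by_cases hC : a = '+' <;>
    simp_all [allowedB, Bool.beq_eq_decide_eq, bne]

-- find at the first '+': on h ++ '+' :: t with '+' ∉ h, find returns h.length
theorem find_plus (h t : List Char) (hh : '+' ∉ h) :
    PySem.Chars.find (h ++ '+' :: t) ['+'] = (h.length : Int) := by
  have hinf : ['+'] <:+: (h ++ '+' :: t) :=
    (List.infix_iff_prefix_suffix).2 ⟨'+' :: t, ⟨t, rfl⟩, ⟨h, rfl⟩⟩
  have h0 : 0 ≤ PySem.Chars.find (h ++ '+' :: t) ['+'] :=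
    (PySem.Chars.find_nonneg_iff _ _).2 hinf
  obtain ⟨hpre, hmin⟩ := PySem.Chars.find_spec (s := h ++ '+' :: t) (sub := ['+']) h0
  set k := (PySem.Chars.find (h ++ '+' :: t) ['+']).toNat with hk
  have hat : ['+'] <+: (h ++ '+' :: t).drop h.length := by
    rw [List.drop_left]; exact ⟨t, rfl⟩
  have hkle : k ≤ h.length := by
    by_contra hlt
    exact hmin h.length (by omega) hat
  have hklen : h.length ≤ k := by
    by_contra hlt
    push Not at hlt
    obtain ⟨t', ht'⟩ := singleton_prefix_iff.1 hpre
    have hget : (h ++ '+' :: t)[k]? = some '+' := by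
      have := congrArg List.head? ht'
      simpa [List.head?_drop] using this
    have hget2 : h[k]? = some '+' := by
      rw [List.getElem?_append_left hlt] at hget; exact hget
    obtain ⟨hlt', heq⟩ := List.getElem?_eq_some_iff.1 hget2
    exact hh (heq ▸ List.getElem_mem _)
  have := Int.toNat_of_nonneg h0
  omega

-- A's core computation equals the partition form with threshold 2
theorem core_eq (l : List Char) :
    (let plus := PySem.Chars.find l ['+']
     if plus < 0 then false
     else if (PySem.Chars.replace l ['0'] []).any
        (fun ch => !(OLC_ALPHABET.contains ch) && !(ch == '+') && !(ch == '0')) then false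
     else PySem.Chars.isIn ['+'] l && decide (2 ≤ PySem.Chars.find l ['+']))
    = pvPart 2 l := by
  by_cases hmem : ('+' : Char) ∈ l
  · have hsplit : l = l.takeWhile (fun ch => ch != '+') ++ l.dropWhile (fun ch => ch != '+') :=
      (List.takeWhile_append_dropWhile).symm
    set h := l.takeWhile (fun ch => ch != '+') with hh
    set r := l.dropWhile (fun ch => ch != '+') with hr
    have hrne : r ≠ [] := by
      intro h0
      have hall : ∀ c ∈ l, ((fun ch => ch != '+') c) = true := by
        rw [← List.dropWhile_eq_nil_iff]; exact h0
      simpa using hall '+' hmem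
    obtain ⟨c, t, hct⟩ := List.exists_cons_of_ne_nil hrne
    have hcplus : c = '+' := by
      have hhead : (r.head hrne != '+') = false :=
        List.head_dropWhile_not (p := fun ch => ch != '+') (l := l)
          (by rw [← hr]; exact hrne)
      simp only [hct] at hhead
      simpa using hhead
    have hhp : ('+' : Char) ∈ h → False := by
      intro hin
      have := List.mem_takeWhile_imp (hh ▸ hin)
      simp at this
    have hl2 : l = h ++ '+' :: t := by rw [hsplit, hct, hcplus]
    have hfind : PySem.Chars.find l ['+'] = (h.length : Int) := by
      rw [hl2]; exact find_plus h t hhp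
    have hisin : PySem.Chars.isIn ['+'] l = true := by
      rw [PySem.Chars.isIn_iff_infix]
      exact (List.infix_iff_prefix_suffix).2 ⟨'+' :: t, ⟨t, rfl⟩, ⟨h, hl2.symm⟩⟩
    have hpart : pyPartitionPlus l = (h, ['+'], t) := by
      have hd : l.dropWhile (fun ch => ch != '+') = '+' :: t := by
        rw [← hr, hct, hcplus]
      simp [pyPartitionPlus, hd]
      exact hh.symm
    unfold pvPart
    rw [hpart]
    simp only [hfind, replace_zero]
    rw [if_neg (by omega : ¬ ((h.length : Int) < 0))]
    have hany : (l.filter (fun c => c != '0')).any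
          (fun ch => !(OLC_ALPHABET.contains ch) && !(ch == '+') && !(ch == '0'))
        = !(h.all allowedB &&
            t.all (fun ch => allowedB ch || ch == '+')) := by
      rw [List.any_filter, hl2]
      simp [List.any_append]
      rw [List.all_eq_not_any_not, List.all_eq_not_any_not]
      simp only [Bool.not_not]
      congr 1
      · apply any_congr_mem
        intro a ha
        exact head_pt a (beq_eq_false_iff_ne.mpr (fun e => hhp (e ▸ ha)))
      · apply any_congr_mem
        intro a _
        exact tail_pt a
    rw [hany]
    have hlen : (decide (2 ≤ (h.length : Int))) = decide (2 ≤ h.length) := by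
      simp
    simp only [hisin, hlen]
    cases hX : h.all allowedB <;>
      cases hY : t.all (fun ch => allowedB ch || ch == '+') <;>
        cases hL : decide (2 ≤ h.length) <;> simp
  · have hfind : PySem.Chars.find l ['+'] = -1 := by
      rw [PySem.Chars.find_eq_neg_one_iff]
      intro hinf
      exact hmem (hinf.mem (by simp))
    have hdrop : l.dropWhile (fun ch => ch != '+') = [] := by
      rw [List.dropWhile_eq_nil_iff]
      intro c hc
      simp
      rintro rfl; exact hmem hc
    simp [hfind, pvPart, pyPartitionPlus, hdrop]

-- ===== VERDICT (by name: the statement is the Claim_ definition above) =====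
theorem olc_is_full_py_spec : Claim_equal_olc_is_full_py := by
  intro code _
  unfold Spec_olc_is_full_py olc_is_full_py olc_is_full_py_alt
  rw [fold_eq_part _ 0 (by omega)]
  exact core_eq (PySem.Chars.upper (PySem.Chars.strip code.toList))
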